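-- pv_equiv track=rewrite | github.com/motional/nuplan-devkit | nuplan/planning/training/preprocessing/feature_builders/vector_builder_utils.py | prune_route_by_connectivity
-- ===== SOURCE A (Python) =====
-- from typing import Dict, List, Set, Tuple
--
-- def prune_route_by_connectivity(route_roadblock_ids: List[str], roadblock_ids: Set[str]) -> List[str]:
--     """
--     Prune route by overlap with extracted roadblock elements within query radius to maintain connectivity in route
--     feature. Assumes route_roadblock_ids is ordered and connected to begin with.
--     :param route_roadblock_ids: List of roadblock ids representing route.
--     :param roadblock_ids: Set of ids of extracted roadblocks within query radius.
--     :return: List of pruned roadblock ids (connected and within query radius).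
--     """
--     pruned_route_roadblock_ids: List[str] = []
--     route_start = False  # wait for route to come into query radius before declaring broken connection
--
--     for roadblock_id in route_roadblock_ids:
--
--         if roadblock_id in roadblock_ids:
--             pruned_route_roadblock_ids.append(roadblock_id)
--             route_start = True
--
--         elif route_start:  # connection broken
--             break
--
--     return pruned_route_roadblock_ids
-- ===== SOURCE B (Python) =====
-- from typing import Dict, List, Set, Tuple
--
-- def prune_route_by_connectivity(route_roadblock_ids: List[str], roadblock_ids: Set[str]) -> List[str]:
--     """Two explicit phases: drop the leading ids not yet in radius, then collect
--     the consecutive run of ids that are in radius."""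
--     in_radius = route_roadblock_ids
--     while in_radius and in_radius[0] not in roadblock_ids:
--         in_radius = in_radius[1:]
--     pruned: List[str] = []
--     for roadblock_id in in_radius:
--         if roadblock_id not in roadblock_ids:
--             break
--         pruned.append(roadblock_id)
--     return pruned
-- ===== Notes on version B (the rewrite author's own statement) =====
-- stated objective: simpler
-- what changed: Replaced the single loop with a route_start flag and break by two explicit phases: drop the leading out-of-radius prefix, then collect the consecutive in-radius run; no flag is maintained.
import Mathlib
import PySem

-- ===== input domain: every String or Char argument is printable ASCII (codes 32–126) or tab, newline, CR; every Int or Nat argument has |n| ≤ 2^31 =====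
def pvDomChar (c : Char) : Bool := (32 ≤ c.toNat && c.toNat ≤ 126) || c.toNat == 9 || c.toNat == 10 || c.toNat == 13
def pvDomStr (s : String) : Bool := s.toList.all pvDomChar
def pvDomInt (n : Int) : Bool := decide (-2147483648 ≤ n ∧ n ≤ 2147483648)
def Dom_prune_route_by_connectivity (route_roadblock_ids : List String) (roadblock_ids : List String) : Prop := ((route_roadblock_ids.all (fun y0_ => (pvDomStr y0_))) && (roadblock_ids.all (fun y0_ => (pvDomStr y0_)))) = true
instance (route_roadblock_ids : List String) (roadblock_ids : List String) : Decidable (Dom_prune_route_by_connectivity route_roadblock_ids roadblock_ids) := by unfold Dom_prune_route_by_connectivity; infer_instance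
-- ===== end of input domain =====

-- B replaces A's single flag-and-break loop by two explicit phases (drop out-of-radius prefix, then collect the in-radius run); return values proved equal on all inputs.


-- ===== PORT A =====
-- A's loop: append members, set route_start; on a non-member after route_start, break.
def pvLoopA (route_roadblock_ids : List String) (roadblock_ids : List String) (route_start : Bool) : List String :=
  match route_roadblock_ids with
  | [] => []
  | roadblock_id :: rest =>
    if roadblock_ids.contains roadblock_id then
      roadblock_id :: pvLoopA rest roadblock_ids true
    else if route_start then []
    else pvLoopA rest roadblock_ids route_start

def prune_route_by_connectivity (route_roadblock_ids : List String) (roadblock_ids : List String) : List String :=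
  pvLoopA route_roadblock_ids roadblock_ids false

-- ===== PORT B =====
-- phase 1 of Source B: while the list is nonempty and its head is not in radius, drop the head
def pvDropPrefix (route_roadblock_ids : List String) (roadblock_ids : List String) : List String :=
  match route_roadblock_ids with
  | [] => []
  | roadblock_id :: rest =>
    if !roadblock_ids.contains roadblock_id then pvDropPrefix rest roadblock_ids
    else roadblock_id :: rest

-- phase 2 of Source B: collect ids until the first non-member (break)
def pvTakeRun (in_radius : List String) (roadblock_ids : List String) : List String :=
  match in_radius with
  | [] => []
  | roadblock_id :: rest =>
    if !roadblock_ids.contains roadblock_id then []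
    else roadblock_id :: pvTakeRun rest roadblock_ids

def prune_route_by_connectivity_alt (route_roadblock_ids : List String) (roadblock_ids : List String) : List String :=
  pvTakeRun (pvDropPrefix route_roadblock_ids roadblock_ids) roadblock_ids

-- ===== PRECONDITION & SPEC =====
def Spec_prune_route_by_connectivity (route_roadblock_ids : List String) (roadblock_ids : List String) (out : List String) : Prop := out = prune_route_by_connectivity_alt route_roadblock_ids roadblock_ids
instance (route_roadblock_ids : List String) (roadblock_ids : List String) (out : List String) : Decidable (Spec_prune_route_by_connectivity route_roadblock_ids roadblock_ids out) := by unfold Spec_prune_route_by_connectivity; infer_instance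

-- ===== CLAIM (what is proved, stated in full; the proofs are below) =====
def Claim_equal_prune_route_by_connectivity : Prop := ∀ (route_roadblock_ids : List String) (roadblock_ids : List String), Dom_prune_route_by_connectivity route_roadblock_ids roadblock_ids → Spec_prune_route_by_connectivity route_roadblock_ids roadblock_ids (prune_route_by_connectivity route_roadblock_ids roadblock_ids)

-- ===== LEMMAS AND PROOFS =====
-- once the route has started, A takes the maximal in-radius run
theorem pvLoopA_true_eq_takeRun (rs bs : List String) : pvLoopA rs bs true = pvTakeRun rs bs := by
  induction rs with
  | nil => rfl
  | cons r t ih =>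
    simp only [pvLoopA, pvTakeRun]
    by_cases h : bs.contains r <;> simp [h, ih]

theorem pvLoopA_false_eq_alt (rs bs : List String) :
    pvLoopA rs bs false = pvTakeRun (pvDropPrefix rs bs) bs := by
  induction rs with
  | nil => rfl
  | cons r t ih =>
    simp only [pvLoopA, pvDropPrefix]
    by_cases h : r ∈ bs
    · simp [h, pvTakeRun, pvLoopA_true_eq_takeRun]
    · simp [h, ih]

-- ===== VERDICT (by name: the statement is the Claim_ definition above) =====
theorem prune_route_by_connectivity_spec : Claim_equal_prune_route_by_connectivity := by
  intro rs bs _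
  show prune_route_by_connectivity rs bs = prune_route_by_connectivity_alt rs bs
  simpa [prune_route_by_connectivity, prune_route_by_connectivity_alt] using pvLoopA_false_eq_alt rs bs
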